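-- pv_equiv track=rewrite | github.com/LTMullineux/adventofcode | 2024/11/main.py | solve
-- ===== SOURCE A (Python) =====
-- from collections import Counter
--
-- def solve(stones: Counter, n: int) -> int:
--     stones_ = stones.copy()
--     for _ in range(n):
--         new_stones = Counter()
--         for i in stones_:
--             # rule 1: 0 -> 1
--             if i == 0:
--                 new_stones[1] += stones_[i]
--             else:
--                 stone_str = str(i)
--                 stone_len = len(stone_str)
--                 # rule 2: even digits -> 2 stones split down the middle
--                 if stone_len % 2 == 0:
--                     halfway = stone_len // 2
--                     left = int(stone_str[:halfway])
--                     right = int(stone_str[halfway:])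
--                     new_stones[left] += stones_[i]
--                     new_stones[right] += stones_[i]
--                 # rule 3: old number * 2024
--                 else:
--                     new_stones[i * 2024] += stones_[i]
--
--         stones_ = new_stones
--
--     return stones_.total()
-- ===== SOURCE B (Python) =====
-- def solve(stones, n):
--     # Depth-first memoized evaluation of the per-stone recurrence instead of
--     # A's breadth-first Counter rebuild; the return value is a plain int.
--     def successors(v):
--         if v == 0:
--             return [1]
--         s = str(v)
--         l = len(s)
--         if l % 2 == 0:
--             h = l // 2
--             return [int(s[:h]), int(s[h:])]
--         return [v * 2024]
--
--     steps = n if n > 0 else 0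
--     memo = {}
--
--     def count(v0):
--         # count(v, s) = number of stones v becomes after s steps, evaluated
--         # depth-first with an explicit stack (no Python recursion) and a memo.
--         stack = [(v0, steps)]
--         while stack:
--             v, s = stack[-1]
--             if (v, s) in memo:
--                 stack.pop()
--                 continue
--             if s == 0:
--                 memo[(v, s)] = 1
--                 stack.pop()
--                 continue
--             succ = successors(v)
--             pending = [(t, s - 1) for t in succ if (t, s - 1) not in memo]
--             if pending:
--                 stack.extend(pending)
--             else:
--                 memo[(v, s)] = sum(memo[(t, s - 1)] for t in succ)
--                 stack.pop()
--         return memo[(v0, steps)]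
--
--     return sum(m * count(v) for v, m in stones.items())
-- ===== Notes on version B (the rewrite author's own statement) =====
-- stated objective: alternative
-- what changed: Replaces A's breadth-first n-round Counter rebuild with a depth-first memoized evaluation of the per-stone recurrence count(v,steps) (explicit stack + memo), combined as sum(mult*count(v,n)) over the input entries.
-- outside the precondition, e.g. on solve({-12: 1}, 1): A returns 1, B returns 1; on solve({-5: 1}, 1): A raises ValueError, B raises ValueError
-- crash fix: On n <= 0, A called with a plain dict raises AttributeError (the loop never rebinds stones_ to a Counter, and dict has no .total()); B returns the total multiplicity sum(stones.values()). — e.g. on solve([(5, 2)], 0): A raises AttributeError, B returns 2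
import Mathlib
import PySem

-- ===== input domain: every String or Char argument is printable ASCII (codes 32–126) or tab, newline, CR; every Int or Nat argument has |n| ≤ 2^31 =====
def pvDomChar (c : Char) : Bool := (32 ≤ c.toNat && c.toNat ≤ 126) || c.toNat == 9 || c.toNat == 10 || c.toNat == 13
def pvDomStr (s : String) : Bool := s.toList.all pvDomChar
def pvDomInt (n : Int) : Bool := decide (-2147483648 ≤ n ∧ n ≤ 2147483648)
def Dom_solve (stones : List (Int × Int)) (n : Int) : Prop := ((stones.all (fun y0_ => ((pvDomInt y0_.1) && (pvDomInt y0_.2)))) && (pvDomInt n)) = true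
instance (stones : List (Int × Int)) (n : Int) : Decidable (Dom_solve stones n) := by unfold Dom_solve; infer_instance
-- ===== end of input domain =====

-- B replaces A's breadth-first n-round Counter rebuild by a depth-first memoized
-- evaluation of the per-stone recurrence; return values agree on Pre_ (alternative
-- decomposition, no speed claim). Both ports realise Python's dicts as Std.TreeMap so
-- they evaluate in reasonable time; a dict's iteration order then differs from
-- Python's insertion order, but every dict here is only read back by key lookup and by
-- an order-independent sum, so the returned value is unaffected.

-- ===== PORT A =====
-- Literal port of A. 'int(...)' is ported as (PySem.Int.ofChars? ...).getD 0: under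
-- Pre_solve every stone value is nonnegative, so both digit halves are nonempty digit
-- strings and int() never raises there (the .getD 0 default is never consulted).
-- Counter lookups stones_[i] / new_stones[t] (missing key = 0) are .getD _ 0;
-- .total() sums the values.
def solve (stones : List (Int × Int)) (n : Int) : Int :=
  let stones0 : Std.TreeMap Int Int compare :=
    stones.foldl (fun t p => t.insert p.1 p.2) (∅ : Std.TreeMap Int Int compare)
  let final :=
    (PySem.List.pyRange 0 n 1).foldl (fun stones_ _ =>
      stones_.keys.foldl (fun new_stones i =>
        if i = 0 then
          new_stones.insert 1 (new_stones.getD 1 0 + stones_.getD i 0)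
        else
          let stone_str := (PySem.Int.toStr i).toList
          let stone_len : Int := (stone_str.length : Int)
          if PySem.Int.mod stone_len 2 = 0 then
            let halfway := PySem.Int.floordiv stone_len 2
            let left := (PySem.Int.ofChars? (PySem.List.slice stone_str none (some halfway))).getD 0
            let right := (PySem.Int.ofChars? (PySem.List.slice stone_str (some halfway) none)).getD 0
            let d1 := new_stones.insert left (new_stones.getD left 0 + stones_.getD i 0)
            d1.insert right (d1.getD right 0 + stones_.getD i 0)
          else
            new_stones.insert (i * 2024) (new_stones.getD (i * 2024) 0 + stones_.getD i 0))
        (∅ : Std.TreeMap Int Int compare))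
      stones0
  (final.toList.map Prod.snd).sum

-- ===== PORT B =====
-- Source B's successors(v); int(...) ported as in port A (exact under Pre_solve).
def succ_solve (v : Int) : List Int :=
  if v = 0 then [1]
  else
    let s := (PySem.Int.toStr v).toList
    let l : Int := (s.length : Int)
    if PySem.Int.mod l 2 = 0 then
      let h := PySem.Int.floordiv l 2
      [(PySem.Int.ofChars? (PySem.List.slice s none (some h))).getD 0,
       (PySem.Int.ofChars? (PySem.List.slice s (some h) none)).getD 0]
    else [v * 2024]

-- Source B's memo key (v, s): encoded into one Int, injectively for 0 ≤ s < 2^64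
-- (s = remaining steps never exceeds n ≤ 2^31 on the stated domain).
def pvEnc (v : Int) (s : Nat) : Int := v * 18446744073709551616 + (s : Int)

-- Source B's count: depth-first memoized evaluation of the recurrence (the explicit stack
-- of Source B is its non-recursive evaluation strategy; the computed memo values are the
-- same), structurally recursive on the remaining step count s, threading the memo.
def countM_solve : Nat → Int → Std.TreeMap Int Int compare →
    Int × Std.TreeMap Int Int compare
  | 0, v, memo =>
    match memo[pvEnc v 0]? with
    | some c => (c, memo)
    | none => (1, memo.insert (pvEnc v 0) 1)
  | s + 1, v, memo =>
    match memo[pvEnc v (s + 1)]? with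
    | some c => (c, memo)
    | none =>
      let r := (succ_solve v).foldl
        (fun acc t =>
          let p := countM_solve s t acc.2
          (acc.1 + p.1, p.2)) ((0 : Int), memo)
      (r.1, r.2.insert (pvEnc v (s + 1)) r.1)

def solve_alt (stones : List (Int × Int)) (n : Int) : Int :=
  let steps := (if 0 < n then n else 0).toNat
  (stones.foldl
    (fun acc p =>
      let r := countM_solve steps p.1 acc.2
      (acc.1 + p.2 * r.1, r.2))
    ((0 : Int), (∅ : Std.TreeMap Int Int compare))).1

-- ===== PRECONDITION & SPEC =====
-- Pre_solve excludes (a) duplicate stone values, which a real Python dict/Counter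
-- argument cannot contain, (b) negative stone values: a negative value can evolve to a
-- single-digit negative, whose two-character str '-d' makes int(s[:1]) = int('-')
-- raise ValueError in BOTH A and B; which (value, n) pairs raise depends on the whole
-- evolution, so all negatives are excluded (on negatives where A happens to return, B
-- returns the same value), and (c) n <= 0, on which A (called with a plain dict) raises
-- AttributeError: the loop never rebinds stones_ to a Counter and dict has no .total().
def Pre_solve (stones : List (Int × Int)) (n : Int) : Prop :=
  (stones.map Prod.fst).Nodup ∧ (∀ p ∈ stones, 0 ≤ p.1) ∧ 0 < n
instance (stones : List (Int × Int)) (n : Int) : Decidable (Pre_solve stones n) := by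
  unfold Pre_solve; infer_instance

def pvWitness_solve : (List (Int × Int)) × Int := ([(0, 3), (17, 2)], 6)

-- On n <= 0 Python A (called with a plain dict) raises AttributeError (dict has no
-- .total()), while B simply returns the total multiplicity sum(stones.values()).
def Raises_solve (stones : List (Int × Int)) (n : Int) : Prop := n ≤ 0
instance (stones : List (Int × Int)) (n : Int) : Decidable (Raises_solve stones n) := by
  unfold Raises_solve; infer_instance

def pvRaiseWitness_solve : (List (Int × Int)) × Int := ([(5, 2)], 0)
def pvRaiseWitnessOut_solve : Int := 2

def Spec_solve (stones : List (Int × Int)) (n : Int) (out : Int) : Prop := out = solve_alt stones n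
instance (stones : List (Int × Int)) (n : Int) (out : Int) : Decidable (Spec_solve stones n out) := by unfold Spec_solve; infer_instance

-- ===== CLAIM (what is proved, stated in full; the proofs are below) =====
def Claim_equal_solve : Prop := ∀ (stones : List (Int × Int)) (n : Int), Dom_solve stones n → Pre_solve stones n → Spec_solve stones n (solve stones n)

def Claim_raises_solve : Prop := (∀ (stones : List (Int × Int)) (n : Int), Dom_solve stones n → Raises_solve stones n → ¬ Pre_solve stones n) ∧ (Dom_solve (pvRaiseWitness_solve.1) (pvRaiseWitness_solve.2) ∧ Raises_solve (pvRaiseWitness_solve.1) (pvRaiseWitness_solve.2) ∧ solve_alt (pvRaiseWitness_solve.1) (pvRaiseWitness_solve.2) = pvRaiseWitnessOut_solve)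

-- ===== LEMMAS AND PROOFS =====

-- the plain (memo-free) recurrence: what Source B's count(v, s) computes
def pvCount : Nat → Int → Int
  | 0, _ => 1
  | s + 1, v => ((succ_solve v).map (pvCount s)).sum

-- 'new_stones[t] += m' as a function of the accumulator
def pvBump (m : Int) (d : Std.TreeMap Int Int compare) (t : Int) :
    Std.TreeMap Int Int compare :=
  d.insert t (d.getD t 0 + m)

-- one round of A's loop, written through succ_solve
def pvStep (d : Std.TreeMap Int Int compare) : Std.TreeMap Int Int compare :=
  d.keys.foldl (fun nw i => (succ_solve i).foldl (pvBump (d.getD i 0)) nw) ∅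

def pvIter : Nat → Std.TreeMap Int Int compare → Std.TreeMap Int Int compare
  | 0, d => d
  | s + 1, d => pvIter s (pvStep d)

-- weighted sum of f over a dict's entries
def pvW (f : Int → Int) (d : Std.TreeMap Int Int compare) : Int :=
  (d.toList.map (fun p => p.2 * f p.1)).sum

theorem pv_enc_inj (v v' : Int) (s s' : Nat) (hs : s < 18446744073709551616)
    (hs' : s' < 18446744073709551616) (h : pvEnc v s = pvEnc v' s') :
    v = v' ∧ s = s' := by
  unfold pvEnc at h
  constructor <;> omega

theorem pv_toList_empty : (∅ : Std.TreeMap Int Int compare).toList = [] := by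
  refine List.eq_nil_iff_forall_not_mem.mpr ?_
  rintro ⟨k, v⟩ hp
  have := Std.TreeMap.mem_toList_iff_getElem?_eq_some.mp hp
  simp at this

theorem pv_not_mem_empty (k : Int) : ¬ k ∈ (∅ : Std.TreeMap Int Int compare) := by
  intro h
  have := Std.TreeMap.mem_iff_isSome_getElem?.mp h
  simp at this

theorem pv_distinct (d : Std.TreeMap Int Int compare) :
    d.toList.Pairwise (fun a b => a.1 ≠ b.1) := by
  have h := Std.TreeMap.distinct_keys_toList (t := d)
  refine h.imp ?_
  intro a b hc e
  exact hc (Std.LawfulEqCmp.compare_eq_iff_eq.mpr e)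

theorem pv_not_mem_fst (d : Std.TreeMap Int Int compare) (k : Int) (hk : ¬ k ∈ d)
    (p : Int × Int) (hp : p ∈ d.toList) : p.1 ≠ k := by
  intro e
  apply hk
  have : (p.1, p.2) ∈ d.toList := by simpa using hp
  have h2 := Std.TreeMap.mem_toList_iff_getElem?_eq_some.mp this
  exact e ▸ Std.TreeMap.mem_iff_isSome_getElem?.mpr (by simp [h2])

theorem pv_getD_mem (d : Std.TreeMap Int Int compare) (p : Int × Int)
    (hp : p ∈ d.toList) : d.getD p.1 0 = p.2 := by
  have h1 : (p.1, p.2) ∈ d.toList := by simpa using hp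
  have h2 := Std.TreeMap.mem_toList_iff_getElem?_eq_some.mp h1
  have h3 : p.1 ∈ d := Std.TreeMap.mem_iff_isSome_getElem?.mpr (by simp [h2])
  have h4 := Std.TreeMap.getElem?_eq_some_getD (t := d) (a := p.1) (fallback := 0) h3
  rw [h2] at h4
  exact (Option.some.inj h4).symm

-- pull one entry with key k out of a sum over a key-distinct pair list
theorem pv_sum_of_mem (l : List (Int × Int)) (g : Int × Int → Int) (k w : Int)
    (hmem : (k, w) ∈ l) (hd : l.Pairwise (fun a b => a.1 ≠ b.1)) :
    (l.map g).sum = g (k, w) + ((l.filter (fun p => !(k == p.1))).map g).sum := by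
  induction l with
  | nil => cases hmem
  | cons a lt ih =>
    rcases List.pairwise_cons.mp hd with ⟨ha, hd'⟩
    rcases List.mem_cons.mp hmem with he | hm
    · subst he
      have hfl : lt.filter (fun p => !(k == p.1)) = lt := by
        refine List.filter_eq_self.mpr (fun p hp => ?_)
        simpa using ha p hp
      simp [List.filter_cons, hfl]
    · have hak : a.1 ≠ k := fun e => (ha _ hm) (e ▸ rfl)
      rw [List.filter_cons]
      have hbk : (!(k == a.1)) = true := by simpa using (Ne.symm hak)
      simp only [hbk, if_pos]
      simp only [List.map_cons, List.sum_cons, ih hm hd']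
      ring

theorem pv_filter_eq_self (d : Std.TreeMap Int Int compare) (k : Int) (hk : ¬ k ∈ d) :
    d.toList.filter (fun p => !(k == p.1)) = d.toList := by
  refine List.filter_eq_self.mpr (fun p hp => ?_)
  simpa using (Ne.symm (pv_not_mem_fst d k hk p hp))

-- the decide-form filter in toList_insert_perm is the boolean one
theorem pv_filter_form (l : List (Int × Int)) (k : Int) :
    l.filter (fun x => decide ¬((k == x.1) = true)) = l.filter (fun p => !(k == p.1)) := by
  apply List.filter_congr
  intro p _
  by_cases h : k = p.1 <;> simp [h]

theorem pv_W_insert (f : Int → Int) (d : Std.TreeMap Int Int compare) (k v : Int) :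
    pvW f (d.insert k v)
      = v * f k + ((d.toList.filter (fun p => !(k == p.1))).map (fun p => p.2 * f p.1)).sum := by
  unfold pvW
  have hperm := Std.TreeMap.toList_insert_perm (t := d) (k := k) (v := v)
  rw [(hperm.map (fun p => p.2 * f p.1)).sum_eq]
  simp only [List.map_cons, List.sum_cons]
  rw [pv_filter_form]

theorem pv_W_bump (f : Int → Int) (d : Std.TreeMap Int Int compare) (m t : Int) :
    pvW f (pvBump m d t) = pvW f d + m * f t := by
  unfold pvBump
  rw [pv_W_insert]
  by_cases hc : t ∈ d
  · have hmem : (t, d.getD t 0) ∈ d.toList :=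
      Std.TreeMap.mem_toList_iff_getElem?_eq_some.mpr
        (Std.TreeMap.getElem?_eq_some_getD hc)
    have := pv_sum_of_mem d.toList (fun p => p.2 * f p.1) t (d.getD t 0) hmem (pv_distinct d)
    unfold pvW
    rw [this]
    ring
  · rw [pv_filter_eq_self d t hc, Std.TreeMap.getD_eq_fallback hc]
    unfold pvW
    ring

theorem pv_W_insert_fresh (f : Int → Int) (d : Std.TreeMap Int Int compare) (k v : Int)
    (hk : ¬ k ∈ d) : pvW f (d.insert k v) = pvW f d + v * f k := by
  rw [pv_W_insert, pv_filter_eq_self d k hk]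
  unfold pvW
  ring

theorem pv_W_bumps (f : Int → Int) (ts : List Int) (m : Int)
    (d : Std.TreeMap Int Int compare) :
    pvW f (ts.foldl (pvBump m) d) = pvW f d + m * (ts.map f).sum := by
  induction ts generalizing d with
  | nil => simp
  | cons a ts ih =>
    rw [List.foldl_cons, ih (pvBump m d a), pv_W_bump]
    simp
    ring

theorem pv_W_step_fold (f : Int → Int) (ks : List Int) (g : Int → Int)
    (acc : Std.TreeMap Int Int compare) :
    pvW f (ks.foldl (fun nw i => (succ_solve i).foldl (pvBump (g i)) nw) acc)
      = pvW f acc + (ks.map (fun i => g i * ((succ_solve i).map f).sum)).sum := by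
  induction ks generalizing acc with
  | nil => simp
  | cons a ks ih =>
    rw [List.foldl_cons, ih, pv_W_bumps]
    simp
    ring

theorem pv_W_empty (f : Int → Int) : pvW f (∅ : Std.TreeMap Int Int compare) = 0 := by
  unfold pvW
  rw [pv_toList_empty]
  simp

theorem pv_W_step (f : Int → Int) (d : Std.TreeMap Int Int compare) :
    pvW f (pvStep d)
      = (d.keys.map (fun i => d.getD i 0 * ((succ_solve i).map f).sum)).sum := by
  unfold pvStep
  rw [pv_W_step_fold, pv_W_empty]
  simp

theorem pv_keys_sum (h : Int → Int) (d : Std.TreeMap Int Int compare) :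
    (d.keys.map (fun i => d.getD i 0 * h i)).sum = pvW h d := by
  unfold pvW
  rw [← Std.TreeMap.map_fst_toList_eq_keys, List.map_map]
  refine congrArg _ (List.map_congr_left (fun p hp => ?_))
  simp [pv_getD_mem d p hp]

theorem pv_main (s : Nat) (d : Std.TreeMap Int Int compare) :
    ((pvIter s d).toList.map Prod.snd).sum = pvW (fun v => pvCount s v) d := by
  induction s generalizing d with
  | zero =>
    show (d.toList.map Prod.snd).sum = _
    unfold pvW
    refine congrArg _ (List.map_congr_left (fun p _ => ?_))
    simp [pvCount]
  | succ s ih =>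
    show ((pvIter s (pvStep d)).toList.map Prod.snd).sum = _
    rw [ih (pvStep d), pv_W_step]
    rw [show (fun i => d.getD i 0 * ((succ_solve i).map (fun v => pvCount s v)).sum)
        = fun i => d.getD i 0 * pvCount (s + 1) i from rfl]
    exact pv_keys_sum _ d

-- A's loop body equals the succ_solve fold
theorem pv_body_eq (d nw : Std.TreeMap Int Int compare) (i : Int) :
    (if i = 0 then
      nw.insert 1 (nw.getD 1 0 + d.getD i 0)
    else
      let stone_str := (PySem.Int.toStr i).toList
      let stone_len : Int := (stone_str.length : Int)
      if PySem.Int.mod stone_len 2 = 0 then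
        let halfway := PySem.Int.floordiv stone_len 2
        let left := (PySem.Int.ofChars? (PySem.List.slice stone_str none (some halfway))).getD 0
        let right := (PySem.Int.ofChars? (PySem.List.slice stone_str (some halfway) none)).getD 0
        let d1 := nw.insert left (nw.getD left 0 + d.getD i 0)
        d1.insert right (d1.getD right 0 + d.getD i 0)
      else
        nw.insert (i * 2024) (nw.getD (i * 2024) 0 + d.getD i 0))
    = (succ_solve i).foldl (pvBump (d.getD i 0)) nw := by
  by_cases h0 : i = 0
  · simp [succ_solve, pvBump, h0]
  · simp only [succ_solve, if_neg h0]
    split_ifs with h2 <;> simp [pvBump]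

theorem pv_foldl_ignore_iter (l : List Int) (d : Std.TreeMap Int Int compare) :
    l.foldl (fun x (_ : Int) => pvStep x) d = pvIter l.length d := by
  induction l generalizing d with
  | nil => rfl
  | cons a t ih => simpa [pvIter] using ih (pvStep d)

theorem pv_solve_eq_iter (stones : List (Int × Int)) (n : Int) :
    solve stones n
      = ((pvIter n.toNat (stones.foldl (fun t p => t.insert p.1 p.2)
          (∅ : Std.TreeMap Int Int compare))).toList.map Prod.snd).sum := by
  unfold solve
  have hfun : (fun (stones_ : Std.TreeMap Int Int compare) (_ : Int) =>
      stones_.keys.foldl (fun new_stones i =>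
        if i = 0 then
          new_stones.insert 1 (new_stones.getD 1 0 + stones_.getD i 0)
        else
          let stone_str := (PySem.Int.toStr i).toList
          let stone_len : Int := (stone_str.length : Int)
          if PySem.Int.mod stone_len 2 = 0 then
            let halfway := PySem.Int.floordiv stone_len 2
            let left := (PySem.Int.ofChars? (PySem.List.slice stone_str none (some halfway))).getD 0
            let right := (PySem.Int.ofChars? (PySem.List.slice stone_str (some halfway) none)).getD 0
            let d1 := new_stones.insert left (new_stones.getD left 0 + stones_.getD i 0)
            d1.insert right (d1.getD right 0 + stones_.getD i 0)
          else
            new_stones.insert (i * 2024) (new_stones.getD (i * 2024) 0 + stones_.getD i 0))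
        (∅ : Std.TreeMap Int Int compare))
      = fun stones_ _ => pvStep stones_ := by
    funext d _
    unfold pvStep
    exact PySem.List.foldl_congr_mem _ _ _ _ (fun nw i _ => pv_body_eq d nw i)
  rw [hfun]
  show ((List.foldl (fun x (_ : Int) => pvStep x)
      (stones.foldl (fun t p => t.insert p.1 p.2) (∅ : Std.TreeMap Int Int compare))
      (PySem.List.pyRange 0 n 1)).toList.map Prod.snd).sum = _
  rw [pv_foldl_ignore_iter, PySem.List.length_pyRange_one]
  simp

-- building the initial dict from a nodup-key pair list
theorem pv_build (f : Int → Int) (l : List (Int × Int))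
    (t : Std.TreeMap Int Int compare)
    (hfresh : ∀ p ∈ l, ¬ p.1 ∈ t) (hnd : (l.map Prod.fst).Nodup) :
    pvW f (l.foldl (fun t p => t.insert p.1 p.2) t)
      = pvW f t + (l.map (fun p => p.2 * f p.1)).sum := by
  induction l generalizing t with
  | nil => simp
  | cons a l ih =>
    rcases List.nodup_cons.mp hnd with ⟨ha, hnd'⟩
    have hfresh' : ∀ p ∈ l, ¬ p.1 ∈ t.insert a.1 a.2 := by
      intro p hp hmem
      rcases Std.TreeMap.mem_insert.mp hmem with he | hm
      · exact ha (Std.LawfulEqCmp.compare_eq_iff_eq.mp he ▸ List.mem_map_of_mem hp)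
      · exact hfresh p (List.mem_cons_of_mem _ hp) hm
    rw [List.foldl_cons, ih _ hfresh' hnd',
      pv_W_insert_fresh f t a.1 a.2 (hfresh a List.mem_cons_self)]
    simp
    ring

-- ===== B side: the memoized evaluator computes pvCount =====

def pvInv (m : Std.TreeMap Int Int compare) : Prop :=
  ∀ (v : Int) (s : Nat), s < 18446744073709551616 →
    ∀ c : Int, m[pvEnc v s]? = some c → c = pvCount s v

theorem pv_inv_empty : pvInv (∅ : Std.TreeMap Int Int compare) := by
  intro v s _ c h
  simp [Std.TreeMap.getElem?_emptyc] at h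

theorem pv_inv_insert (m : Std.TreeMap Int Int compare) (hm : pvInv m)
    (v : Int) (s : Nat) (hs : s < 18446744073709551616)
    (c : Int) (hc : c = pvCount s v) : pvInv (m.insert (pvEnc v s) c) := by
  intro v' s' hs' c' h
  rw [Std.TreeMap.getElem?_insert] at h
  split_ifs at h with he
  · have he' := Std.LawfulEqCmp.compare_eq_iff_eq.mp he
    obtain ⟨rfl, rfl⟩ := pv_enc_inj v v' s s' hs hs' he'
    exact (Option.some.inj h) ▸ hc
  · exact hm v' s' hs' c' h

theorem pv_countM (s : Nat) : s < 18446744073709551616 →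
    ∀ (v : Int) (memo : Std.TreeMap Int Int compare), pvInv memo →
      (countM_solve s v memo).1 = pvCount s v ∧ pvInv (countM_solve s v memo).2 := by
  induction s with
  | zero =>
    intro hs v memo hInv
    rcases hm : memo[pvEnc v 0]? with _ | c <;> simp only [countM_solve, hm]
    · exact ⟨rfl, pv_inv_insert memo hInv v 0 hs 1 rfl⟩
    · exact ⟨hInv v 0 hs c hm, hInv⟩
  | succ s ih =>
    intro hs v memo hInv
    have hs' : s < 18446744073709551616 := by omega
    rcases hm : memo[pvEnc v (s + 1)]? with _ | c <;> simp only [countM_solve, hm]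
    · have hfold : ∀ (l : List Int) (a : Int) (m0 : Std.TreeMap Int Int compare),
          pvInv m0 →
          (l.foldl (fun acc t =>
              let p := countM_solve s t acc.2
              (acc.1 + p.1, p.2)) (a, m0)).1 = a + (l.map (pvCount s)).sum ∧
          pvInv (l.foldl (fun acc t =>
              let p := countM_solve s t acc.2
              (acc.1 + p.1, p.2)) (a, m0)).2 := by
        intro l
        induction l with
        | nil => intro a m0 h0; exact ⟨by simp, h0⟩
        | cons x l ihl =>
          intro a m0 h0
          obtain ⟨hx1, hx2⟩ := ih hs' x m0 h0
          simp only [List.foldl_cons]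
          obtain ⟨h1, h2⟩ := ihl (a + (countM_solve s x m0).1) (countM_solve s x m0).2 hx2
          refine ⟨?_, h2⟩
          rw [h1, hx1]
          simp
          ring
      obtain ⟨h1, h2⟩ := hfold (succ_solve v) 0 memo hInv
      constructor
      · rw [h1]
        simp [pvCount]
      · exact pv_inv_insert _ h2 v (s + 1) hs _ (by rw [h1]; simp [pvCount])
    · exact ⟨hInv v (s + 1) hs c hm, hInv⟩

theorem pv_alt_eq (stones : List (Int × Int)) (steps : Nat)
    (hsteps : steps < 18446744073709551616) :
    (stones.foldl
      (fun acc p =>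
        let r := countM_solve steps p.1 acc.2
        (acc.1 + p.2 * r.1, r.2))
      ((0 : Int), (∅ : Std.TreeMap Int Int compare))).1
      = (stones.map (fun p => p.2 * pvCount steps p.1)).sum := by
  suffices h : ∀ (l : List (Int × Int)) (a : Int) (m0 : Std.TreeMap Int Int compare),
      pvInv m0 →
      (l.foldl (fun acc p =>
          let r := countM_solve steps p.1 acc.2
          (acc.1 + p.2 * r.1, r.2)) (a, m0)).1
        = a + (l.map (fun p => p.2 * pvCount steps p.1)).sum by
    rw [h stones 0 ∅ pv_inv_empty]
    simp
  intro l
  induction l with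
  | nil => intro a m0 _; simp
  | cons x l ihl =>
    intro a m0 h0
    obtain ⟨hx1, hx2⟩ := pv_countM steps hsteps x.1 m0 h0
    simp only [List.foldl_cons]
    rw [ihl _ _ hx2, hx1]
    simp
    ring

-- ===== VERDICT (by name: the statement is the Claim_ definition above) =====
theorem solve_spec : Claim_equal_solve := by
  intro stones n hdom hpre
  unfold Spec_solve
  have hn : n ≤ 2147483648 := by
    unfold Dom_solve at hdom
    simp only [Bool.and_eq_true, pvDomInt, decide_eq_true_eq] at hdom
    exact hdom.2.2
  have hsteps : n.toNat < 18446744073709551616 := by omega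
  rw [pv_solve_eq_iter, pv_main]
  rw [pv_build (fun v => pvCount n.toNat v) stones ∅
    (fun p _ => pv_not_mem_empty p.1) hpre.1, pv_W_empty]
  unfold solve_alt
  have hif : (if 0 < n then n else 0).toNat = n.toNat := by
    split_ifs with h
    · rfl
    · omega
  rw [hif, pv_alt_eq stones n.toNat hsteps]
  simp

@[simp] theorem solve_raises : Claim_raises_solve := by
  unfold Claim_raises_solve
  refine ⟨?_, by decide⟩
  intro stones n _ hr hp
  exact absurd hp.2.2 (by unfold Raises_solve at hr; omega)
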